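-- pv_equiv track=rewrite | github.com/miliar/Code_Jam_Webscraper | solutions_python/Problem_54/312.py | solve
-- ===== SOURCE A (Python) =====
-- def GCD(a, b):
-- 	while b > 0:
-- 		c = a
-- 		a = b
-- 		b = c % b
-- 	return a
--
-- def AllGCD(numbers):
-- 	n = len(numbers)
-- 	if n == 1:
-- 		return numbers[0]
--
-- 	g = GCD(numbers[0], numbers[1])
-- 	for i in range(1, n):
-- 		g = GCD(g, numbers[i])
-- 	return g
--
-- def getT(numbers):
-- 	ret = []
-- 	numbers = sorted(numbers)
-- 	n = len(numbers)
-- 	for i in range(1, n):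
-- 		tmp = numbers[i] - numbers[i-1]
-- 		ret.append(tmp)
-- 	return AllGCD(ret)
--
-- def solve(numbers):
-- 	t = getT(numbers)
-- 	if numbers[0] % t == 0:
-- 		return 0
-- 	else:
-- 		return t - numbers[0] % t
-- 	n = len(numbers)
-- 	for i in range(0, t):
-- 		y = i
-- 		hena = 1
-- 		for j in range(0, n):
-- 			if (numbers[j] + i) % t != 0:
-- 				hena = 0
-- 		if hena == 1:
-- 			return y
-- 	return -1
-- ===== SOURCE B (Python) =====
-- def _gcd(a, b):
--     return a if b == 0 else _gcd(b, a % b)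
--
-- def solve(numbers):
--     x0 = numbers[0]
--     t = 0
--     for x in numbers:
--         t = _gcd(t, abs(x - x0))
--     r = x0 % t
--     return 0 if r == 0 else t - r
-- ===== Notes on version B (the rewrite author's own statement) =====
-- stated objective: faster
-- what changed: B drops the sort entirely: instead of sorting and folding GCD over consecutive differences, it folds a recursive gcd over the absolute differences from the first element in one pass.
import Mathlib
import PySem

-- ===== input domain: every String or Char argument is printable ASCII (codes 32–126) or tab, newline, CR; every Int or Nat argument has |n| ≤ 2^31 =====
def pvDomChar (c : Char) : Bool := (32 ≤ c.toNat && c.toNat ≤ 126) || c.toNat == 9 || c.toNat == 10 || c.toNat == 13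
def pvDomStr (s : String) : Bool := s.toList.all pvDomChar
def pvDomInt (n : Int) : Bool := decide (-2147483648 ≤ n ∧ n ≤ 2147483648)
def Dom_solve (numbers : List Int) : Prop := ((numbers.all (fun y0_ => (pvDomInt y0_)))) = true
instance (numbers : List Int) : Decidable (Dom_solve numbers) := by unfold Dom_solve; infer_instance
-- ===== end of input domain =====

-- B drops A's sort: it folds a recursive gcd over absolute differences from the first
-- element in one O(n) pass instead of sorting and folding GCD over consecutive differences.

-- ===== PORT A =====
-- A's hand-written Euclid loop `while b > 0: c=a; a=b; b=c%b`
def pyGCD (a b : Int) : Int :=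
  if 0 < b then pyGCD b (PySem.Int.mod a b) else a
termination_by b.toNat
decreasing_by
  have h1 := PySem.Int.mod_nonneg a (by assumption : (0:Int) < b)
  have h2 := PySem.Int.mod_lt a (by assumption : (0:Int) < b)
  omega

-- A's AllGCD (indices are in range whenever Pre_solve holds; pyGetD's default is never read there)
def allGCD (numbers : List Int) : Int :=
  let n := numbers.length
  if n = 1 then PySem.List.pyGetD numbers 0 0
  else
    let g := pyGCD (PySem.List.pyGetD numbers 0 0) (PySem.List.pyGetD numbers 1 0)
    (PySem.List.pyRange 1 (n : Int) 1).foldl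
      (fun g i => pyGCD g (PySem.List.pyGetD numbers i 0)) g

-- A's getT: sort, collect consecutive differences, take their AllGCD
def getT (numbers : List Int) : Int :=
  let s := PySem.List.sorted numbers (fun x => x) false
  let n := s.length
  let ret := (PySem.List.pyRange 1 (n : Int) 1).foldl
      (fun ret i => ret ++ [PySem.List.pyGetD s i 0 - PySem.List.pyGetD s (i - 1) 0]) []
  allGCD ret

-- the code after A's if/else return is unreachable and is not ported
def solve (numbers : List Int) : Int :=
  let t := getT numbers
  if PySem.Int.mod (PySem.List.pyGetD numbers 0 0) t = 0 then 0
  else t - PySem.Int.mod (PySem.List.pyGetD numbers 0 0) t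

-- ===== PORT B =====
-- B's recursive gcd `a if b == 0 else _gcd(b, a % b)`
def bgcd (a b : Int) : Int :=
  if b = 0 then a else bgcd b (PySem.Int.mod a b)
termination_by b.natAbs
decreasing_by
  rename_i h
  rcases lt_or_gt_of_ne h with hb | hb
  · have := PySem.Int.mod_neg_bounds a hb
    omega
  · have h1 := PySem.Int.mod_nonneg a hb
    have h2 := PySem.Int.mod_lt a hb
    omega

def solve_alt (numbers : List Int) : Int :=
  let x0 := PySem.List.pyGetD numbers 0 0
  let t := numbers.foldl (fun t x => bgcd t |x - x0|) 0
  let r := PySem.Int.mod x0 t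
  if r = 0 then 0 else t - r

-- ===== PRECONDITION & SPEC =====
-- Pre_ excludes lists of length < 2 (A's AllGCD indexes into an empty diff list: IndexError)
-- and constant lists (the diff-GCD t is 0, so A's `numbers[0] % t` raises ZeroDivisionError).
def Pre_solve (numbers : List Int) : Prop :=
  2 ≤ numbers.length ∧ ∃ x ∈ numbers, x ≠ numbers.headI
instance (numbers : List Int) : Decidable (Pre_solve numbers) := by unfold Pre_solve; infer_instance

def pvWitness_solve : List Int := [3, 7, 11]

def Spec_solve (numbers : List Int) (out : Int) : Prop := out = solve_alt numbers
instance (numbers : List Int) (out : Int) : Decidable (Spec_solve numbers out) := by unfold Spec_solve; infer_instance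

-- ===== CLAIM (what is proved, stated in full; the proofs are below) =====
def Claim_equal_solve : Prop := ∀ (numbers : List Int), Dom_solve numbers → Pre_solve numbers → Spec_solve numbers (solve numbers)

-- ===== LEMMAS AND PROOFS =====

-- the common mathematical value both folds compute: an accumulated Nat gcd
def gf (g : Nat) (l : List Int) : Nat := l.foldl (fun g x => Nat.gcd g x.natAbs) g

-- consecutive differences of a list
def diffs : List Int → List Int
  | a :: b :: r => (b - a) :: diffs (b :: r)
  | _ => []

theorem gcd_mod_step (a b : Int) (hb : 0 < b) : Int.gcd b (PySem.Int.mod a b) = Int.gcd a b := by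
  rw [PySem.Int.mod_eq_emod_of_pos hb, Int.gcd_comm b, Int.gcd_emod]

theorem pyGCD_eq_gcd (a b : Int) (ha : 0 ≤ a) (hb : 0 ≤ b) : pyGCD a b = (Int.gcd a b : Int) := by
  by_cases h : 0 < b
  · rw [pyGCD, if_pos h,
      pyGCD_eq_gcd b (PySem.Int.mod a b) hb (PySem.Int.mod_nonneg a h), gcd_mod_step a b h]
  · have : b = 0 := by omega
    subst this
    rw [pyGCD, if_neg h]
    simp [Int.gcd, Int.natAbs_of_nonneg ha]
termination_by b.toNat
decreasing_by
  have h1 := PySem.Int.mod_nonneg a (by assumption : (0:Int) < b)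
  have h2 := PySem.Int.mod_lt a (by assumption : (0:Int) < b)
  omega

theorem bgcd_eq_gcd (a b : Int) (ha : 0 ≤ a) (hb : 0 ≤ b) : bgcd a b = (Int.gcd a b : Int) := by
  by_cases h : b = 0
  · subst h
    rw [bgcd, if_pos rfl]
    simp [Int.gcd, Int.natAbs_of_nonneg ha]
  · have hb' : 0 < b := by omega
    rw [bgcd, if_neg h,
      bgcd_eq_gcd b (PySem.Int.mod a b) hb (PySem.Int.mod_nonneg a hb'), gcd_mod_step a b hb']
termination_by b.natAbs
decreasing_by
  have hb' : 0 < b := by omega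
  have h1 := PySem.Int.mod_nonneg a hb'
  have h2 := PySem.Int.mod_lt a hb'
  omega

theorem gf_dvd_init (g : Nat) (l : List Int) : gf g l ∣ g := by
  induction l generalizing g with
  | nil => simp [gf]
  | cons x t ih =>
      exact (ih (Nat.gcd g x.natAbs)).trans (Nat.gcd_dvd_left _ _)

theorem gf_dvd_mem (g : Nat) (l : List Int) (x : Int) (hx : x ∈ l) : gf g l ∣ x.natAbs := by
  induction l generalizing g with
  | nil => cases hx
  | cons y t ih =>
      rcases List.mem_cons.mp hx with h | h
      · subst h
        show gf (Nat.gcd g x.natAbs) t ∣ x.natAbs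
        exact (gf_dvd_init _ _).trans (Nat.gcd_dvd_right _ _)
      · exact ih _ h

theorem dvd_gf (k g : Nat) (l : List Int) (hg : k ∣ g) (hl : ∀ x ∈ l, k ∣ x.natAbs) :
    k ∣ gf g l := by
  induction l generalizing g with
  | nil => exact hg
  | cons y t ih =>
      exact ih (Nat.gcd g y.natAbs)
        (Nat.dvd_gcd hg (hl y List.mem_cons_self)) (fun x hx => hl x (List.mem_cons_of_mem _ hx))

-- A's fold of pyGCD over a nonnegative list is the accumulated Nat gcd
theorem foldA (l : List Int) (g : Int) (hg : 0 ≤ g) (hl : ∀ x ∈ l, 0 ≤ x) :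
    l.foldl (fun g x => pyGCD g x) g = (gf g.toNat l : Int) := by
  induction l generalizing g with
  | nil => simp [gf, Int.toNat_of_nonneg hg]
  | cons y t ih =>
      have hy : 0 ≤ y := hl y List.mem_cons_self
      have h1 : pyGCD g y = (Int.gcd g y : Int) := pyGCD_eq_gcd g y hg hy
      have h2 : (Int.gcd g y : Int).toNat = Nat.gcd g.toNat y.natAbs := by
        simp [Int.gcd]
        congr 1
        omega
      simp only [List.foldl_cons, h1, gf]
      rw [ih _ (Int.natCast_nonneg _) (fun x hx => hl x (List.mem_cons_of_mem _ hx))]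
      simp [gf, h2]

-- B's fold of bgcd over absolute anchored differences is the accumulated Nat gcd of the mapped list
theorem foldB (l : List Int) (x0 : Int) (g : Int) (hg : 0 ≤ g) :
    l.foldl (fun t x => bgcd t |x - x0|) g = (gf g.toNat (l.map (fun x => x - x0)) : Int) := by
  induction l generalizing g with
  | nil => simp [gf, Int.toNat_of_nonneg hg]
  | cons y t ih =>
      have h1 : bgcd g |y - x0| = (Int.gcd g |y - x0| : Int) :=
        bgcd_eq_gcd g _ hg (abs_nonneg _)
      have h2 : (Int.gcd g |y - x0| : Int).toNat = Nat.gcd g.toNat (y - x0).natAbs := by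
        simp [Int.gcd, Int.natAbs_abs]
        congr 1
        omega
      simp only [List.foldl_cons, List.map_cons, h1, gf]
      rw [ih _ (Int.natCast_nonneg _)]
      simp [gf, h2]

theorem diffs_length (s : List Int) : (diffs s).length = s.length - 1 := by
  induction s with
  | nil => simp [diffs]
  | cons a t ih =>
      cases t with
      | nil => simp [diffs]
      | cons b r => simp [diffs] at ih ⊢; omega

-- the getD-indexed form of the consecutive-difference list
theorem range_map_diffs (s : List Int) :
    (List.range (s.length - 1)).map (fun k => s.getD (k + 1) 0 - s.getD k 0) = diffs s := by
  induction s with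
  | nil => simp [diffs]
  | cons a t ih =>
      cases t with
      | nil => simp [diffs]
      | cons b r =>
          have hlen : (a :: b :: r).length - 1 = r.length + 1 := by simp
          rw [hlen, List.range_succ_eq_map, List.map_cons, List.map_map]
          simp only [diffs]
          congr 1

theorem diffs_nonneg (s : List Int) (hs : s.Pairwise (· ≤ ·)) : ∀ x ∈ diffs s, 0 ≤ x := by
  induction s with
  | nil => simp [diffs]
  | cons a t ih =>
      cases t with
      | nil => simp [diffs]
      | cons b r =>
          intro x hx
          rcases List.mem_cons.mp hx with h | h
          · have hab : a ≤ b := (List.pairwise_cons.mp hs).1 b List.mem_cons_self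
            omega
          · exact ih (List.pairwise_cons.mp hs).2 x h

theorem diffs_mem_sub (s : List Int) (x : Int) (hx : x ∈ diffs s) :
    ∃ u ∈ s, ∃ v ∈ s, x = u - v := by
  induction s with
  | nil => cases hx
  | cons a t ih =>
      cases t with
      | nil => cases hx
      | cons b r =>
          rcases List.mem_cons.mp hx with h | h
          · exact ⟨b, by simp, a, by simp, h⟩
          · obtain ⟨u, hu, v, hv, he⟩ := ih h
            exact ⟨u, List.mem_cons_of_mem _ hu, v, List.mem_cons_of_mem _ hv, he⟩

-- if k divides every consecutive difference of a :: l then it divides u - a for every member u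
theorem dvd_anchor (k : Nat) (a : Int) (l : List Int)
    (h : ∀ d ∈ diffs (a :: l), (k : Int) ∣ d) :
    ∀ u ∈ a :: l, (k : Int) ∣ u - a := by
  induction l generalizing a with
  | nil =>
      intro u hu
      simp at hu
      simp [hu]
  | cons b r ih =>
      intro u hu
      rcases List.mem_cons.mp hu with h1 | h1
      · simp [h1]
      · have hba : (k : Int) ∣ b - a := h _ (by simp [diffs])
        have hub : (k : Int) ∣ u - b :=
          ih b (fun d hd => h d (by simp [diffs] at hd ⊢; tauto)) u h1
        have : u - a = (u - b) + (b - a) := by ring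
        rw [this]
        exact dvd_add hub hba

-- core: gcd of consecutive diffs of the sorted list = gcd of anchored diffs (anchor ∈ list)
theorem gf_diffs_eq_gf_anchor (numbers : List Int) (x0 : Int) (hx0 : x0 ∈ numbers) :
    gf 0 (diffs (PySem.List.sorted numbers (fun x => x) false)) =
    gf 0 (numbers.map (fun x => x - x0)) := by
  set s := PySem.List.sorted numbers (fun x => x) false with hs
  have hmem : ∀ x, x ∈ s ↔ x ∈ numbers := fun x => PySem.List.mem_sorted numbers (fun y => y) false x
  apply Nat.dvd_antisymm
  · -- gf diffs ∣ gf anchored: k := gf 0 (diffs s) divides every x - x0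
    apply dvd_gf _ _ _ (dvd_zero _)
    intro y hy
    obtain ⟨x, hxn, rfl⟩ := List.mem_map.mp hy
    -- k divides every consecutive diff of s
    have hk : ∀ d ∈ diffs s, ((gf 0 (diffs s) : Nat) : Int) ∣ d := by
      intro d hd
      exact Int.dvd_natAbs.mp (Int.natCast_dvd_natCast.mpr (gf_dvd_mem 0 _ d hd))
    obtain ⟨c, t, hct⟩ : ∃ c t, s = c :: t := by
      cases hsl : s with
      | nil =>
          exfalso
          have := (hmem x0).mpr hx0
          rw [hsl] at this
          cases this
      | cons c t => exact ⟨c, t, rfl⟩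
    have hanch := dvd_anchor (gf 0 (diffs s)) c t (by rw [← hct]; exact hk)
    have hx_s : x ∈ s := (hmem x).mpr hxn
    have hx0_s : x0 ∈ s := (hmem x0).mpr hx0
    have d1 : ((gf 0 (diffs s) : Nat) : Int) ∣ x - c := hanch x (hct ▸ hx_s)
    have d2 : ((gf 0 (diffs s) : Nat) : Int) ∣ x0 - c := hanch x0 (hct ▸ hx0_s)
    have : x - x0 = (x - c) - (x0 - c) := by ring
    have hd : ((gf 0 (diffs s) : Nat) : Int) ∣ x - x0 := this ▸ dvd_sub d1 d2
    exact Int.natCast_dvd_natCast.mp (Int.dvd_natAbs.mpr hd)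
  · -- gf anchored ∣ gf diffs: every consecutive diff is (u - x0) - (v - x0)
    apply dvd_gf _ _ _ (dvd_zero _)
    intro d hd
    obtain ⟨u, hu, v, hv, rfl⟩ := diffs_mem_sub s d hd
    have hku : ((gf 0 (numbers.map (fun x => x - x0)) : Nat) : Int) ∣ u - x0 :=
      Int.dvd_natAbs.mp (Int.natCast_dvd_natCast.mpr
        (gf_dvd_mem 0 _ _ (List.mem_map.mpr ⟨u, (hmem u).mp hu, rfl⟩)))
    have hkv : ((gf 0 (numbers.map (fun x => x - x0)) : Nat) : Int) ∣ v - x0 :=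
      Int.dvd_natAbs.mp (Int.natCast_dvd_natCast.mpr
        (gf_dvd_mem 0 _ _ (List.mem_map.mpr ⟨v, (hmem v).mp hv, rfl⟩)))
    have : u - v = (u - x0) - (v - x0) := by ring
    have hduv : ((gf 0 (numbers.map (fun x => x - x0)) : Nat) : Int) ∣ u - v :=
      this ▸ dvd_sub hku hkv
    exact Int.natCast_dvd_natCast.mp (Int.dvd_natAbs.mpr hduv)

-- A's ret-building fold produces exactly the consecutive-difference list
theorem ret_eq_diffs (s : List Int) :
    (PySem.List.pyRange 1 (s.length : Int) 1).foldl
      (fun ret i => ret ++ [PySem.List.pyGetD s i 0 - PySem.List.pyGetD s (i - 1) 0]) [] = diffs s := by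
  rw [PySem.List.foldl_append_singleton_eq_map, PySem.List.pyRange_one, List.map_map,
    List.nil_append, ← range_map_diffs s,
    show ((s.length : Int) - 1).toNat = s.length - 1 by omega]
  apply List.map_congr_left
  intro k _
  simp only [Function.comp]
  rw [show (1 : Int) + (k : Int) - 1 = ((k : Nat) : Int) by omega,
    show (1 : Int) + (k : Int) = ((k + 1 : Nat) : Int) by push_cast; ring,
    PySem.List.pyGetD_natCast, PySem.List.pyGetD_natCast]

theorem allGCD_eq_gf (l : List Int) (hne : l ≠ []) (hl : ∀ x ∈ l, 0 ≤ x) :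
    allGCD l = (gf 0 l : Int) := by
  cases l with
  | nil => cases hne rfl
  | cons d0 t =>
      cases t with
      | nil =>
          have h0 : 0 ≤ d0 := hl d0 List.mem_cons_self
          simp only [allGCD]
          rw [if_pos (by simp)]
          show PySem.List.pyGetD [d0] 0 0 = ((gf 0 [d0] : Nat) : Int)
          rw [show PySem.List.pyGetD [d0] 0 0 = d0 by simp [pysem],
            show gf 0 [d0] = d0.natAbs from Nat.gcd_zero_left _]
          omega
      | cons d1 r =>
          have h0 : 0 ≤ d0 := hl d0 List.mem_cons_self
          have h1 : 0 ≤ d1 := hl d1 (List.mem_cons_of_mem _ List.mem_cons_self)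
          simp only [allGCD]
          rw [if_neg (by simp)]
          rw [show PySem.List.pyGetD (d0 :: d1 :: r) 0 0 = d0 by simp [pysem],
            show PySem.List.pyGetD (d0 :: d1 :: r) 1 0 = d1 by simp [pysem]]
          rw [PySem.List.foldl_pyRange_pyGetD' (d0 :: d1 :: r) 0
            (fun g x => pyGCD g x) (pyGCD d0 d1) (by norm_num : (0:Int) ≤ 1)]
          rw [show ((1 : Int).toNat) = 1 from rfl]
          rw [show List.drop 1 (d0 :: d1 :: r) = d1 :: r from rfl]
          rw [pyGCD_eq_gcd d0 d1 h0 h1]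
          rw [foldA (d1 :: r) _ (Int.natCast_nonneg _)
            (fun x hx => hl x (List.mem_cons_of_mem _ hx))]
          rw [Int.toNat_natCast]
          show ((gf (Int.gcd d0 d1) (d1 :: r) : Nat) : Int) = ((gf 0 (d0 :: d1 :: r) : Nat) : Int)
          congr 1
          show gf (Nat.gcd (Int.gcd d0 d1) d1.natAbs) r = gf (Nat.gcd (Nat.gcd 0 d0.natAbs) d1.natAbs) r
          congr 1
          show Nat.gcd (Nat.gcd d0.natAbs d1.natAbs) d1.natAbs = Nat.gcd (Nat.gcd 0 d0.natAbs) d1.natAbs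
          rw [Nat.gcd_assoc, Nat.gcd_self, Nat.gcd_zero_left]

-- the two folds compute the same gcd
theorem key_t (numbers : List Int) (h2 : 2 ≤ numbers.length) :
    getT numbers =
      numbers.foldl (fun t x => bgcd t |x - PySem.List.pyGetD numbers 0 0|) 0 := by
  obtain ⟨n0, rest, rfl⟩ : ∃ n0 rest, numbers = n0 :: rest := by
    cases numbers with
    | nil => simp at h2
    | cons a t => exact ⟨a, t, rfl⟩
  rw [show PySem.List.pyGetD (n0 :: rest) 0 0 = n0 by simp [pysem]]
  rw [foldB (n0 :: rest) n0 0 le_rfl]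
  rw [show ((0 : Int).toNat) = 0 from rfl]
  rw [← gf_diffs_eq_gf_anchor (n0 :: rest) n0 List.mem_cons_self]
  simp only [getT]
  rw [ret_eq_diffs]
  apply allGCD_eq_gf
  · have hd := diffs_length (PySem.List.sorted (n0 :: rest) (fun x => x) false)
    rw [PySem.List.length_sorted] at hd
    intro h
    rw [h] at hd
    simp only [List.length_nil, List.length_cons] at hd
    simp only [List.length_cons] at h2
    omega
  · exact diffs_nonneg _ (PySem.List.sorted_pairwise (n0 :: rest) (fun x => x))

-- ===== VERDICT (by name: the statement is the Claim_ definition above) =====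
theorem solve_spec : Claim_equal_solve := by
  intro numbers _ hpre
  show solve numbers = solve_alt numbers
  simp only [solve, solve_alt]
  rw [key_t numbers hpre.1]
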